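-- pv_equiv track=rewrite | github.com/turksabsw/Frappe-V15 | frappe-bench/apps/frappe_pim/frappe_pim/api/product.py | _resolve_scoped_value
-- ===== SOURCE A (Python) =====
-- from typing import Optional, List, Dict, Any, Union
--
-- def _resolve_scoped_value(
--     values: List[Dict],
--     locale: Optional[str] = None,
--     channel: Optional[str] = None
-- ) -> Optional[Dict]:
--     """Resolve the best value from a list using 3D scope fallback
--
--     Resolution order:
--     1. locale + channel (exact match)
--     2. locale only
--     3. channel only
--     4. unscoped
--     """
--     # Score each value based on scope match
--     scored = []
--     for v in values:
--         score = 0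
--         v_locale = v.get("locale")
--         v_channel = v.get("channel")
--
--         # Exact match gets highest score
--         if v_locale == locale and v_channel == channel:
--             score = 4
--         elif v_locale == locale and not v_channel:
--             score = 3
--         elif v_channel == channel and not v_locale:
--             score = 2
--         elif not v_locale and not v_channel:
--             score = 1
--         else:
--             # Non-matching scoped value
--             continue
--
--         scored.append((score, v))
--
--     if not scored:
--         return None
--
--     # Return highest scoring value
--     scored.sort(key=lambda x: x[0], reverse=True)
--     return scored[0][1]
-- ===== SOURCE B (Python) =====
-- from typing import Optional, List, Dict
--
--
-- def _resolve_scoped_value(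
--     values: List[Dict],
--     locale: Optional[str] = None,
--     channel: Optional[str] = None
-- ) -> Optional[Dict]:
--     """Resolve the best value by scanning priority tiers high-to-low,
--     returning the first value matching the current tier (no scoring, no sort)."""
--     tiers = [
--         lambda vl, vc: vl == locale and vc == channel,
--         lambda vl, vc: vl == locale and not vc,
--         lambda vl, vc: vc == channel and not vl,
--         lambda vl, vc: not vl and not vc,
--     ]
--     for tier in tiers:
--         for v in values:
--             if tier(v.get("locale"), v.get("channel")):
--                 return v
--     return None
-- ===== Notes on version B (the rewrite author's own statement) =====
-- stated objective: simpler
-- what changed: Replaced A's score-every-value-then-stable-sort-and-take-head with four prioritized tier passes (exact, locale-only, channel-only, unscoped) that return the first value matching the highest tier; no scored list and no sort are built.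
import Mathlib
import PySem

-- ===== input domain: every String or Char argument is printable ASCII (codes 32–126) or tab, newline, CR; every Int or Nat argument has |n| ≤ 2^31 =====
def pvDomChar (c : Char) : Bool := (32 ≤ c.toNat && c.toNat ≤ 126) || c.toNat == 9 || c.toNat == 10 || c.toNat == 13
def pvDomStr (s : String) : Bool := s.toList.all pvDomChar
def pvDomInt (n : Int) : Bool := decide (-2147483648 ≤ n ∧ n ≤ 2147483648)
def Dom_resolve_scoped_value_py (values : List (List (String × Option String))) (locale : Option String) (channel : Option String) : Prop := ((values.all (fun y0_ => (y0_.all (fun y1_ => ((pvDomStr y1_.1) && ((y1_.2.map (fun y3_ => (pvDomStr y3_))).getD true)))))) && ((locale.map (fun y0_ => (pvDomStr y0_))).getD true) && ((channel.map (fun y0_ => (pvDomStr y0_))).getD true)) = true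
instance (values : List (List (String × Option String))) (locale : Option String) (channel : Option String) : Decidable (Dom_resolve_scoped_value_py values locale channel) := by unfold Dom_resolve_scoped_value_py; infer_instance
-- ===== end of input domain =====

-- B replaces A's score-everything-then-stable-sort with four prioritized left-to-right passes
-- returning the first match of the highest tier (objective: simpler; return value only — no mutation is observable).

-- v.get(k): dict lookup with default None, merged with the stored Optional[str] value
def pvVGet (v : List (String × Option String)) (k : String) : Option String :=
  ((PySem.Dict.mk v).get? k).getD none

-- Python truthiness of an Optional[str]: None and "" are falsy
def pvFalsy (o : Option String) : Bool := o == none || o == some ""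

-- ===== PORT A =====
def resolve_scoped_value_py (values : List (List (String × Option String))) (locale : Option String) (channel : Option String) : Option (List (String × Option String)) :=
  let scored : List (Int × List (String × Option String)) :=
    values.foldl (fun scored v =>
      let v_locale := pvVGet v "locale"
      let v_channel := pvVGet v "channel"
      if v_locale == locale && v_channel == channel then scored ++ [((4 : Int), v)]
      else if v_locale == locale && pvFalsy v_channel then scored ++ [((3 : Int), v)]
      else if v_channel == channel && pvFalsy v_locale then scored ++ [((2 : Int), v)]
      else if pvFalsy v_locale && pvFalsy v_channel then scored ++ [((1 : Int), v)]
      else scored) []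
  if scored.isEmpty then none
  else
    match PySem.List.pyGet? (PySem.List.sorted scored (fun x => x.1) true) 0 with
    | some x => some x.2
    | none => none

-- ===== PORT B =====
def resolve_scoped_value_py_alt (values : List (List (String × Option String))) (locale : Option String) (channel : Option String) : Option (List (String × Option String)) :=
  match values.find? (fun v => pvVGet v "locale" == locale && pvVGet v "channel" == channel) with
  | some v => some v
  | none =>
  match values.find? (fun v => pvVGet v "locale" == locale && pvFalsy (pvVGet v "channel")) with
  | some v => some v
  | none =>
  match values.find? (fun v => pvVGet v "channel" == channel && pvFalsy (pvVGet v "locale")) with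
  | some v => some v
  | none =>
  match values.find? (fun v => pvFalsy (pvVGet v "locale") && pvFalsy (pvVGet v "channel")) with
  | some v => some v
  | none => none

-- ===== PRECONDITION & SPEC =====
def Spec_resolve_scoped_value_py (values : List (List (String × Option String))) (locale : Option String) (channel : Option String) (out : Option (List (String × Option String))) : Prop := out = resolve_scoped_value_py_alt values locale channel
instance (values : List (List (String × Option String))) (locale : Option String) (channel : Option String) (out : Option (List (String × Option String))) : Decidable (Spec_resolve_scoped_value_py values locale channel out) := by unfold Spec_resolve_scoped_value_py; infer_instance

-- ===== CLAIM (what is proved, stated in full; the proofs are below) =====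
def Claim_equal_resolve_scoped_value_py : Prop := ∀ (values : List (List (String × Option String))) (locale : Option String) (channel : Option String), Dom_resolve_scoped_value_py values locale channel → Spec_resolve_scoped_value_py values locale channel (resolve_scoped_value_py values locale channel)

-- ===== LEMMAS AND PROOFS =====

-- left-biased "keep the higher score" combiner: the head of a stable descending sort
def pvMerge {α : Type} (m : Option (Int × α)) (r : Option (Int × α)) : Option (Int × α) :=
  match m, r with
  | none, r => r
  | some p, none => some p
  | some p, some q => if p.1 < q.1 then some q else some p

-- A's scoring filter, abstractly over the four tier predicates
def pvScore {α : Type} (p4 p3 p2 p1 : α → Bool) (v : α) : Option (Int × α) :=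
  if p4 v then some (4, v)
  else if p3 v then some (3, v)
  else if p2 v then some (2, v)
  else if p1 v then some (1, v)
  else none

-- B's tiered search, abstractly, with the tier score attached
def pvChain {α : Type} (p4 p3 p2 p1 : α → Bool) (l : List α) : Option (Int × α) :=
  match l.find? p4 with
  | some v => some (4, v)
  | none =>
  match l.find? p3 with
  | some v => some (3, v)
  | none =>
  match l.find? p2 with
  | some v => some (2, v)
  | none =>
  match l.find? p1 with
  | some v => some (1, v)
  | none => none

theorem pvMerge_assoc {α : Type} (a b c : Option (Int × α)) :
    pvMerge (pvMerge a b) c = pvMerge a (pvMerge b c) := by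
  rcases a with _ | ⟨s, x⟩ <;> rcases b with _ | ⟨t, y⟩ <;> rcases c with _ | ⟨u, z⟩ <;>
    simp only [pvMerge] <;> split_ifs <;>
    first | rfl | omega | (simp only [pvMerge]; split_ifs <;> first | rfl | omega)

theorem pvChain_cons {α : Type} (p4 p3 p2 p1 : α → Bool) (v : α) (l : List α) :
    pvChain p4 p3 p2 p1 (v :: l) = pvMerge (pvScore p4 p3 p2 p1 v) (pvChain p4 p3 p2 p1 l) := by
  by_cases h4 : p4 v <;> by_cases h3 : p3 v <;> by_cases h2 : p2 v <;> by_cases h1 : p1 v <;>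
    simp only [pvChain, pvScore, List.find?_cons, h4, h3, h2, h1, if_true] <;>
    rcases l.find? p4 with _ | a <;> rcases l.find? p3 with _ | b <;>
    rcases l.find? p2 with _ | c <;> rcases l.find? p1 with _ | d <;>
    norm_num [pvMerge]

-- one step of the running "best so far" fold
def pvStep {α : Type} (before : α → α → Bool) (m : Option α) (x : α) : Option α :=
  match m with
  | none => some x
  | some m0 => if before x m0 then some x else some m0

-- the head of an insertion into a list, as one fold step
theorem pvHead_insertBy {α : Type} (before : α → α → Bool) (x : α) (acc : List α) :
    (PySem.List.insertBy before x acc).head? = pvStep before acc.head? x := by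
  cases acc with
  | nil => rfl
  | cons y ys =>
    simp only [PySem.List.insertBy, List.head?_cons, pvStep]
    split_ifs <;> simp

-- the head of an insertion-sort fold is a running "best so far" fold
theorem pvHead_foldl_insertBy {α : Type} (before : α → α → Bool) (l : List α) :
    ∀ acc : List α,
      (l.foldl (fun acc x => PySem.List.insertBy before x acc) acc).head?
        = l.foldl (pvStep before) acc.head? := by
  induction l with
  | nil => intro acc; rfl
  | cons x l ih =>
    intro acc
    simp only [List.foldl_cons, ih, pvHead_insertBy]

-- A's scored-list fold is a filterMap by pvScore
theorem pvScored_eq_filterMap {α : Type} (p4 p3 p2 p1 : α → Bool) (l : List α) :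
    ∀ a : List (Int × α),
      l.foldl (fun acc v =>
        if p4 v then acc ++ [((4 : Int), v)]
        else if p3 v then acc ++ [((3 : Int), v)]
        else if p2 v then acc ++ [((2 : Int), v)]
        else if p1 v then acc ++ [((1 : Int), v)]
        else acc) a
      = a ++ l.filterMap (pvScore p4 p3 p2 p1) := by
  induction l with
  | nil => intro a; simp
  | cons v l ih =>
    intro a
    simp only [List.foldl_cons, List.filterMap_cons, pvScore]
    split_ifs <;> rw [ih] <;> simp [pvScore]

-- folding the "best so far" step over the scored list is a merge with the tiered search
theorem pvFoldl_step_filterMap {α : Type} (p4 p3 p2 p1 : α → Bool)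
    (before : (Int × α) → (Int × α) → Bool) (hb : ∀ x y, before x y = decide (y.1 < x.1)) :
    ∀ (l : List α) (m : Option (Int × α)),
      ((l.filterMap (pvScore p4 p3 p2 p1)).foldl (pvStep before) m)
        = pvMerge m (pvChain p4 p3 p2 p1 l) := by
  intro l
  induction l with
  | nil => intro m; cases m <;> rfl
  | cons v l ih =>
    intro m
    rw [List.filterMap_cons]
    rcases h : pvScore p4 p3 p2 p1 v with _ | b
    · rw [ih, pvChain_cons, h]
      cases m <;> rfl
    · rw [List.foldl_cons, ih, pvChain_cons, h, ← pvMerge_assoc]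
      congr 1
      cases m with
      | none => rfl
      | some m0 =>
          show (if before b m0 then some b else some m0) = _
          rw [hb]; simp [pvMerge]

-- generic core: score + stable descending sort + take head = tiered first-match search
theorem pvCore {α : Type} (p4 p3 p2 p1 : α → Bool) (l : List α) :
    (PySem.List.sorted (l.filterMap (pvScore p4 p3 p2 p1)) (fun x => x.1) true).head?
      = pvChain p4 p3 p2 p1 l := by
  rw [PySem.List.sorted_rev_eq_foldl_insertBy, pvHead_foldl_insertBy]
  have h := pvFoldl_step_filterMap p4 p3 p2 p1
      (fun a b => decide (b.1 < a.1)) (fun x y => rfl) l none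
  simp only [List.head?_nil]
  rw [h]
  cases pvChain p4 p3 p2 p1 l <;> rfl

-- ===== VERDICT (by name: the statement is the Claim_ definition above) =====
theorem resolve_scoped_value_py_spec : Claim_equal_resolve_scoped_value_py := by
  intro values locale channel _
  unfold Spec_resolve_scoped_value_py resolve_scoped_value_py resolve_scoped_value_py_alt
  set p4 : List (String × Option String) → Bool :=
    fun v => pvVGet v "locale" == locale && pvVGet v "channel" == channel with hp4
  set p3 : List (String × Option String) → Bool :=
    fun v => pvVGet v "locale" == locale && pvFalsy (pvVGet v "channel") with hp3
  set p2 : List (String × Option String) → Bool :=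
    fun v => pvVGet v "channel" == channel && pvFalsy (pvVGet v "locale") with hp2
  set p1 : List (String × Option String) → Bool :=
    fun v => pvFalsy (pvVGet v "locale") && pvFalsy (pvVGet v "channel") with hp1
  have hscored := pvScored_eq_filterMap p4 p3 p2 p1 values []
  simp only [hp4, hp3, hp2, hp1, List.nil_append] at hscored
  rw [hscored]
  have hcore := pvCore p4 p3 p2 p1 values
  rcases hs : values.filterMap (pvScore p4 p3 p2 p1) with _ | ⟨x, xs⟩
  · -- empty scored list: A returns None, and no tier can match
    rw [hs] at hcore
    simp only [List.isEmpty_nil, if_true]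
    have : pvChain p4 p3 p2 p1 values = none := by
      rw [← hcore]; rfl
    unfold pvChain at this
    rcases h4 : values.find? p4 with _ | a <;> rw [h4] at this <;> try simp_all
    rcases h3 : values.find? p3 with _ | b <;> rw [h3] at this <;> try simp_all
    rcases h2 : values.find? p2 with _ | c <;> rw [h2] at this <;> try simp_all
    rcases h1 : values.find? p1 with _ | d <;> rw [h1] at this <;> simp_all
  · rw [hs] at hcore
    simp only [List.isEmpty_cons, if_false, Bool.false_eq_true]
    have hne : PySem.List.sorted (x :: xs) (fun x => x.1) true ≠ [] := by
      simp [PySem.List.sorted_eq_nil_iff]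
    rcases hsort : PySem.List.sorted (x :: xs) (fun x => x.1) true with _ | ⟨y, ys⟩
    · exact absurd hsort hne
    · rw [hsort] at hcore
      simp only [List.head?_cons] at hcore
      have hget : PySem.List.pyGet? (y :: ys) (0 : Int) = some y := by
        simp [PySem.List.pyGet?, PySem.List.pyIdx?]
      rw [hget]
      unfold pvChain at hcore
      rcases h4 : values.find? p4 with _ | a <;> rw [h4] at hcore
      case _ =>
        rcases h3 : values.find? p3 with _ | b <;> rw [h3] at hcore
        case _ =>
          rcases h2 : values.find? p2 with _ | c <;> rw [h2] at hcore
          case _ =>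
            rcases h1 : values.find? p1 with _ | d <;> rw [h1] at hcore <;> simp_all
          case _ => simp_all
        case _ => simp_all
      case _ => simp_all
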